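-- pv_equiv track=rewrite | github.com/EgorLappo/ac_lattices | utils.py | name_leaves
-- ===== SOURCE A (Python) =====
-- def name_leaves(newick_tree):
--     """Suppose you are lazy and write down an unlabeled tree,
--        like ((*,*),(*,(*,*)))... Then this function names the nodes.
--
--     Args:
--         newick_tree (str): unlabeled topology encoded as a Newick string.
--
--     Returns:
--         str: labeled Newick string.
--     """
--     alphabet = 'abcdefghijklmnopqrstuvwxyzs'
--     i = 0
--     new_tree = []
--     for ch in newick_tree:
--         if ch != " ":
--             if ch == "*":
--                 new_tree.append(alphabet[i])
--                 i += 1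
--             else:
--                 new_tree.append(ch)
--     return ''.join(new_tree)
-- ===== SOURCE B (Python) =====
-- def name_leaves(newick_tree):
--     alphabet = 'abcdefghijklmnopqrstuvwxyzs'
--     s = ''.join(ch for ch in newick_tree if ch != ' ')
--     parts = s.split('*')
--     out = [parts[0]]
--     for i, seg in enumerate(parts[1:]):
--         out.append(alphabet[i])
--         out.append(seg)
--     return ''.join(out)
-- ===== Notes on version B (the rewrite author's own statement) =====
-- stated objective: simpler
-- what changed: B replaces A's per-character scan with a stateful label counter by stripping spaces, splitting the string on '*' and interleaving the segments with consecutive alphabet labels.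
import Mathlib
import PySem

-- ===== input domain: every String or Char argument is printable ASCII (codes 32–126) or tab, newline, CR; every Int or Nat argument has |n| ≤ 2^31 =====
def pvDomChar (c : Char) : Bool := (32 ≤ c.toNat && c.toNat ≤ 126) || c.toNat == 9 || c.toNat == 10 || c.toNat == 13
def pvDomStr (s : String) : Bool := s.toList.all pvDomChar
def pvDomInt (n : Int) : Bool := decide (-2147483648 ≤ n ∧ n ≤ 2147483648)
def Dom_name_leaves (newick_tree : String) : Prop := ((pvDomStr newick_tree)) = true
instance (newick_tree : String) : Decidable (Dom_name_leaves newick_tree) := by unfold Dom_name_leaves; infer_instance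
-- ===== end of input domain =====

-- B labels the stars by splitting on '*' and interleaving with the alphabet instead of A's
-- per-character scan with a counter; same values everywhere Python A returns (objective: simpler).

-- ===== PORT A =====
def pvAlphA : List Char := "abcdefghijklmnopqrstuvwxyzs".toList

-- A's loop body: skip spaces, replace the k-th '*' by alphabet[k], keep other characters.
-- alphabet[i] raises IndexError for i >= 27 in Python; Pre_ excludes those inputs, so the
-- getD default is never part of the returned value on admitted inputs.
def pvStepA (st : Nat × List Char) (ch : Char) : Nat × List Char :=
  if ch ≠ ' ' then
    if ch = '*' then (st.1 + 1, st.2 ++ [pvAlphA.getD st.1 '?'])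
    else (st.1, st.2 ++ [ch])
  else st

def name_leaves (newick_tree : String) : String :=
  String.mk (newick_tree.toList.foldl pvStepA (0, [])).2

-- ===== PORT B =====
def pvAlphB : List Char := "abcdefghijklmnopqrstuvwxyzs".toList

-- B's loop body: append alphabet[i] and the next segment (same IndexError boundary as A,
-- excluded by Pre_).
def pvStepB (st : List Char × Nat) (seg : List Char) : List Char × Nat :=
  (st.1 ++ [pvAlphB.getD st.2 '?'] ++ seg, st.2 + 1)

-- B: strip spaces, split on '*' (Python str.split('*') on a 1-char separator = List.splitOn,
-- which always returns a nonempty list, so parts[0] is total), then out = parts[0] followed by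
-- alphabet[i], seg for each later segment.
def name_leaves_alt (newick_tree : String) : String :=
  String.mk
    (((newick_tree.toList.filter (fun ch => ch ≠ ' ')).splitOn '*').tail.foldl pvStepB
      ((((newick_tree.toList.filter (fun ch => ch ≠ ' ')).splitOn '*').headD []), 0)).1

-- ===== PRECONDITION & SPEC =====
-- Pre_ excludes exactly the inputs with more than 27 '*', on which Python A (and B) raises IndexError.
def Pre_name_leaves (newick_tree : String) : Prop := newick_tree.toList.count '*' ≤ 27

instance (newick_tree : String) : Decidable (Pre_name_leaves newick_tree) := by
  unfold Pre_name_leaves; infer_instance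

def pvWitness_name_leaves : String := "((*,*), (*,(*,*)))"

def Spec_name_leaves (newick_tree : String) (out : String) : Prop := out = name_leaves_alt newick_tree
instance (newick_tree : String) (out : String) : Decidable (Spec_name_leaves newick_tree out) := by unfold Spec_name_leaves; infer_instance

-- ===== CLAIM (what is proved, stated in full; the proofs are below) =====
def Claim_equal_name_leaves : Prop := ∀ (newick_tree : String), Dom_name_leaves newick_tree → Pre_name_leaves newick_tree → Spec_name_leaves newick_tree (name_leaves newick_tree)

-- ===== LEMMAS AND PROOFS =====

-- Reference recursion: label the stars of a space-free character list.
def pvG (i : Nat) : List Char → List Char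
  | [] => []
  | c :: t => if c = '*' then pvAlphA.getD i '?' :: pvG (i + 1) t else c :: pvG i t

-- Interleave: label :: segment for each segment, labels counting up from i.
def pvIlv (i : Nat) : List (List Char) → List Char
  | [] => []
  | seg :: rest => pvAlphA.getD i '?' :: (seg ++ pvIlv (i + 1) rest)

theorem pvAB_eq : pvAlphB = pvAlphA := rfl

-- A's fold accumulates acc ++ pvG i (spaces skipped inline = filtered first).
theorem pvA_loop (cs : List Char) : ∀ (i : Nat) (acc : List Char),
    (cs.foldl pvStepA (i, acc)).2 = acc ++ pvG i (cs.filter (fun ch => ch ≠ ' ')) := by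
  induction cs with
  | nil => intro i acc; simp [pvG]
  | cons c t ih =>
    intro i acc
    rw [List.foldl_cons]
    by_cases hs : c = ' '
    · rw [show pvStepA (i, acc) c = (i, acc) by simp [pvStepA, hs], ih]
      simp [hs]
    · by_cases hst : c = '*'
      · rw [show pvStepA (i, acc) c = (i + 1, acc ++ [pvAlphA.getD i '?']) by
            simp [pvStepA, hst], ih]
        simp [hst, pvG]
      · rw [show pvStepA (i, acc) c = (i, acc ++ [c]) by simp [pvStepA, hs, hst], ih]
        simp [hs, hst, pvG]

-- B's fold over the tail segments accumulates acc ++ pvIlv i parts.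
theorem pvB_loop (parts : List (List Char)) : ∀ (i : Nat) (acc : List Char),
    (parts.foldl pvStepB (acc, i)).1 = acc ++ pvIlv i parts := by
  induction parts with
  | nil => intro i acc; simp [pvIlv]
  | cons seg rest ih =>
    intro i acc
    rw [List.foldl_cons, show pvStepB (acc, i) seg = (acc ++ [pvAlphA.getD i '?'] ++ seg, i + 1) by
        simp [pvStepB, pvAB_eq], ih]
    simp [pvIlv]

-- Splitting on '*' and interleaving recovers the direct labelling recursion.
theorem pvSplit_ilv (cs : List Char) : ∀ (i : Nat),
    (cs.splitOn '*').headD [] ++ pvIlv i (cs.splitOn '*').tail = pvG i cs := by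
  induction cs with
  | nil => intro i; simp [pvG, pvIlv]
  | cons c t ih =>
    intro i
    have hcons : (c :: t).splitOn '*' =
        if c = '*' then [] :: t.splitOn '*' else (t.splitOn '*').modifyHead (c :: ·) := by
      simp [List.splitOn, List.splitOnP_cons]
    have hne : t.splitOn '*' ≠ [] := by
      simp [List.splitOn]; exact List.splitOnP_ne_nil _ t
    obtain ⟨p0, rest, hp⟩ := List.exists_cons_of_ne_nil hne
    by_cases hst : c = '*'
    · subst hst
      rw [hcons, if_pos rfl, hp]
      have h2 := ih (i + 1)
      rw [hp] at h2
      simp [pvIlv, pvG, ← h2]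
    · rw [hcons, if_neg hst, hp]
      have h2 := ih i
      rw [hp] at h2
      simp [List.modifyHead, pvG, hst, ← h2]

-- ===== VERDICT (by name: the statement is the Claim_ definition above) =====
theorem name_leaves_spec : Claim_equal_name_leaves := by
  intro s _ _
  show name_leaves s = name_leaves_alt s
  simp only [name_leaves, name_leaves_alt]
  rw [pvA_loop, pvB_loop, pvSplit_ilv]
  simp
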